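-- pv_equiv track=rewrite | github.com/jebreimo/Argen | clapgen/clapgen.py | inferIndentation
-- ===== SOURCE A (Python) =====
-- def inferIndentation(line):
--     gaps = []
--     start = -1
--     for i, c in enumerate(line):
--         if c.isspace():
--             if start == -1:
--                 start = i
--         elif start != -1:
--             if i - start > 1:
--                 gaps.append((i - start, start))
--             start = -1
--     if start != -1:
--         gaps.append((len(line) - start, start))
--     if not gaps:
--         return 0
--     gaps.sort()
--     return gaps[-1][0] + gaps[-1][1]
-- ===== SOURCE B (Python) =====
-- def inferIndentation(line):
--     n = len(line)
--     best = None  # (length, start) of best kept whitespace run, under tuple order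
--     i = 0
--     while i < n:
--         if line[i].isspace():
--             j = i + 1
--             while j < n and line[j].isspace():
--                 j += 1
--             if j - i > 1 or j == n:
--                 key = (j - i, i)
--                 if best is None or key > best:
--                     best = key
--             i = j
--         else:
--             i += 1
--     return best[0] + best[1] if best is not None else 0
-- ===== Notes on version B (the rewrite author's own statement) =====
-- stated objective: alternative
-- what changed: Replaces the per-character state machine that collects all gaps into a list and sorts it with a run-skipping two-level scan that keeps only a single running maximum (length, start) key, so no list and no sort are needed.
import Mathlib
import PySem

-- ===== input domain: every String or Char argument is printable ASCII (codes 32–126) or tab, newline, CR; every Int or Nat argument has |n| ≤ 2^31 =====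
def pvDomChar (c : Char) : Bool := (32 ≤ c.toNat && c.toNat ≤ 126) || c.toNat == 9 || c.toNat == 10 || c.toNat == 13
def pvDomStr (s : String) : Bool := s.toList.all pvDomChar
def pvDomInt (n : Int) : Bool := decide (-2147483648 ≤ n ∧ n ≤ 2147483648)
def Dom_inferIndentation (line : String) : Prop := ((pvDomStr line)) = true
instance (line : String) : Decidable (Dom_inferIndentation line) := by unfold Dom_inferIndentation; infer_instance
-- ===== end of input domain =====

-- B replaces A's per-character state machine + gap list + sort by a run-skipping scan
-- holding a single running maximum (length, start); return values are proved equal on all inputs.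

-- ===== PORT A =====
-- the for-loop over enumerate(line): state (gaps, start), index i carried explicitly
def aLoop : List Char → Int → List (Int × Int) → Int → (List (Int × Int) × Int)
  | [], _, gaps, start => (gaps, start)
  | c :: rest, i, gaps, start =>
    if PySem.Chars.isspace c then
      aLoop rest (i + 1) gaps (if start = -1 then i else start)
    else if start ≠ -1 then
      aLoop rest (i + 1) (if 1 < i - start then gaps ++ [(i - start, start)] else gaps) (-1)
    else
      aLoop rest (i + 1) gaps start

def inferIndentation (line : String) : Int :=
  let cs := line.toList
  let p := aLoop cs 0 [] (-1)
  -- trailing flush: if start != -1: gaps.append((len(line) - start, start))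
  let gaps := if p.2 ≠ -1 then p.1 ++ [((cs.length : Int) - p.2, p.2)] else p.1
  if gaps = [] then 0
  else
    -- gaps.sort(): Python sorts int pairs lexicographically
    let g := PySem.List.sorted gaps (fun q => toLex q)
    let q := PySem.List.pyGetD g (-1) (0, 0)
    q.1 + q.2

-- ===== PORT B =====
-- outer while: recursion over the remaining characters, index i carried explicitly;
-- inner while (j): skipping the whitespace run = takeWhile/dropWhile on the rest
def bLoop (n : Nat) : List Char → Nat → Option (Int × Int) → Option (Int × Int)
  | [], _, best => best
  | c :: rest, i, best =>
    if PySem.Chars.isspace c then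
      let j := i + 1 + (rest.takeWhile PySem.Chars.isspace).length
      let key : Int × Int := ((j : Int) - (i : Int), (i : Int))
      let best' :=
        if 1 < j - i ∨ j = n then
          match best with
          | none => some key
          | some b => if b.1 < key.1 ∨ (b.1 = key.1 ∧ b.2 < key.2) then some key else some b
        else best
      bLoop n (rest.dropWhile PySem.Chars.isspace) j best'
    else
      bLoop n rest (i + 1) best
termination_by cs _ _ => cs.length
decreasing_by
  · simp only [List.length_cons]
    have := List.length_dropWhile_le (p := PySem.Chars.isspace) (l := rest); omega
  · simp only [List.length_cons]; omega

def inferIndentation_alt (line : String) : Int :=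
  let cs := line.toList
  match bLoop cs.length cs 0 none with
  | none => 0
  | some b => b.1 + b.2

-- ===== PRECONDITION & SPEC =====
def Spec_inferIndentation (line : String) (out : Int) : Prop := out = inferIndentation_alt line
instance (line : String) (out : Int) : Decidable (Spec_inferIndentation line out) := by unfold Spec_inferIndentation; infer_instance

-- ===== CLAIM (what is proved, stated in full; the proofs are below) =====
def Claim_equal_inferIndentation : Prop := ∀ (line : String), Dom_inferIndentation line → Spec_inferIndentation line (inferIndentation line)

-- ===== LEMMAS AND PROOFS =====

-- the kept whitespace runs of cs starting at index i in a line of total length n, as (length, start)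
def keptRuns (n : Nat) : List Char → Nat → List (Int × Int)
  | [], _ => []
  | c :: rest, i =>
    if PySem.Chars.isspace c then
      let j := i + 1 + (rest.takeWhile PySem.Chars.isspace).length
      (if 1 < j - i ∨ j = n then [((j : Int) - (i : Int), (i : Int))] else [])
        ++ keptRuns n (rest.dropWhile PySem.Chars.isspace) j
    else
      keptRuns n rest (i + 1)
termination_by cs _ => cs.length
decreasing_by
  · simp only [List.length_cons]
    have := List.length_dropWhile_le (p := PySem.Chars.isspace) (l := rest); omega
  · simp only [List.length_cons]; omega

def flushA (n : Nat) (p : List (Int × Int) × Int) : List (Int × Int) :=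
  if p.2 ≠ -1 then p.1 ++ [((n : Int) - p.2, p.2)] else p.1

def lexStep (b : Option (Int × Int)) (p : Int × Int) : Option (Int × Int) :=
  match b with
  | none => some p
  | some q => if q.1 < p.1 ∨ (q.1 = p.1 ∧ q.2 < p.2) then some p else some q

theorem aLoop_ws_run (run : List Char) (h : ∀ c ∈ run, PySem.Chars.isspace c = true)
    (rest : List Char) (i s : Int) (hs : s ≠ -1) (gaps : List (Int × Int)) :
    aLoop (run ++ rest) i gaps s = aLoop rest (i + run.length) gaps s := by
  induction run generalizing i with
  | nil => simp
  | cons c t ih =>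
    have hc : PySem.Chars.isspace c = true := h c (by simp)
    have ht : ∀ x ∈ t, PySem.Chars.isspace x = true := fun x hx => h x (by simp [hx])
    simp only [List.cons_append, aLoop, hc, if_true, if_neg hs, List.length_cons]
    rw [ih ht (i + 1)]
    have : i + 1 + (t.length : Int) = i + (((t.length + 1 : Nat)) : Int) := by push_cast; ring
    rw [this]

theorem dropWhile_head_false (rest : List Char) (c : Char) (t : List Char)
    (h : rest.dropWhile PySem.Chars.isspace = c :: t) : PySem.Chars.isspace c = false := by
  induction rest with
  | nil => simp at h
  | cons a l ih =>
    by_cases hp : PySem.Chars.isspace a = true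
    · rw [List.dropWhile_cons_of_pos hp] at h
      exact ih h
    · rw [List.dropWhile_cons_of_neg hp] at h
      cases h
      simpa using hp

theorem aLoop_flush (m : Nat) : ∀ (cs : List Char), cs.length ≤ m →
    ∀ (i : Nat) (gaps : List (Int × Int)) (n : Nat), n = i + cs.length →
    flushA n (aLoop cs (i : Int) gaps (-1)) = gaps ++ keptRuns n cs i := by
  induction m with
  | zero =>
    intro cs hcs i gaps n _
    cases cs with
    | nil => simp [aLoop, flushA, keptRuns]
    | cons a l => exact absurd hcs (by simp)
  | succ m ih =>
    intro cs hcs i gaps n hn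
    cases cs with
    | nil => simp [aLoop, flushA, keptRuns]
    | cons c rest =>
      have hn' : n = i + rest.length + 1 := by simp [List.length_cons] at hn; omega
      have hcs' : rest.length ≤ m := by simp [List.length_cons] at hcs; omega
      by_cases hc : PySem.Chars.isspace c = true
      · have hs : ((i : Nat) : Int) ≠ -1 := by omega
        have h1 : aLoop (c :: rest) (i : Int) gaps (-1) =
            aLoop rest ((i : Int) + 1) gaps (i : Int) := by
          simp [aLoop, hc]
        have hws : ∀ x ∈ rest.takeWhile PySem.Chars.isspace, PySem.Chars.isspace x = true :=
          fun x hx => List.mem_takeWhile_imp hx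
        have hcast : ((i : Int) + 1) + ((rest.takeWhile PySem.Chars.isspace).length : Int)
            = ((i + 1 + (rest.takeWhile PySem.Chars.isspace).length : Nat) : Int) := by
          push_cast; ring
        have h2 : aLoop rest ((i : Int) + 1) gaps (i : Int) =
            aLoop (rest.dropWhile PySem.Chars.isspace)
              (((i + 1 + (rest.takeWhile PySem.Chars.isspace).length : Nat) : Int)) gaps (i : Int) := by
          conv_lhs => rw [← List.takeWhile_append_dropWhile (p := PySem.Chars.isspace) (l := rest)]
          rw [aLoop_ws_run _ hws _ ((i : Int) + 1) (i : Int) hs gaps, hcast]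
        have hklen : (rest.takeWhile PySem.Chars.isspace).length
            + (rest.dropWhile PySem.Chars.isspace).length = rest.length := by
          conv_rhs => rw [← List.takeWhile_append_dropWhile (p := PySem.Chars.isspace) (l := rest)]
          rw [List.length_append]
        rw [h1, h2, keptRuns]
        simp only [hc, if_true]
        cases hdrop : rest.dropWhile PySem.Chars.isspace with
        | nil =>
          rw [hdrop] at hklen
          have hjn : i + 1 + (rest.takeWhile PySem.Chars.isspace).length = n := by
            simp at hklen; omega
          simp only [aLoop, keptRuns, List.append_nil, flushA]
          rw [if_pos hs, if_pos (Or.inr hjn), hjn]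
        | cons c' rest'' =>
          have hc' : PySem.Chars.isspace c' = false := dropWhile_head_false rest c' rest'' hdrop
          have hlen'' : rest''.length + 1 + (rest.takeWhile PySem.Chars.isspace).length
              = rest.length := by rw [hdrop] at hklen; simp at hklen; omega
          have hjn : ¬ (i + 1 + (rest.takeWhile PySem.Chars.isspace).length = n) := by omega
          have hcast2 : ((i + 1 + (rest.takeWhile PySem.Chars.isspace).length : Nat) : Int) + 1
              = ((i + 1 + (rest.takeWhile PySem.Chars.isspace).length + 1 : Nat) : Int) := by
            push_cast; ring
          have hstep : aLoop (c' :: rest'')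
              (((i + 1 + (rest.takeWhile PySem.Chars.isspace).length : Nat) : Int)) gaps (i : Int)
              = aLoop rest''
                (((i + 1 + (rest.takeWhile PySem.Chars.isspace).length + 1 : Nat) : Int))
                (if 1 < ((i + 1 + (rest.takeWhile PySem.Chars.isspace).length : Nat) : Int) - (i : Int)
                 then gaps ++ [(((i + 1 + (rest.takeWhile PySem.Chars.isspace).length : Nat) : Int) - (i : Int), (i : Int))]
                 else gaps) (-1) := by
            simp only [aLoop, hc', Bool.false_eq_true, if_false, if_pos hs]
            rw [hcast2]
          rw [hstep,
            ih rest'' (by omega) _ _ n (by omega)]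
          rw [keptRuns]
          simp only [hc', Bool.false_eq_true, if_false]
          have hcond : (1 < ((i + 1 + (rest.takeWhile PySem.Chars.isspace).length : Nat) : Int) - (i : Int))
              ↔ (1 < i + 1 + (rest.takeWhile PySem.Chars.isspace).length - i) := by omega
          by_cases hbig : 1 < i + 1 + (rest.takeWhile PySem.Chars.isspace).length - i
          · rw [if_pos (hcond.mpr hbig), if_pos (Or.inl hbig)]
            simp
          · rw [if_neg (fun h => hbig (hcond.mp h)), if_neg (by tauto)]
            simp
      · have hc0 : PySem.Chars.isspace c = false := by simpa using hc
        have hcast : ((i : Nat) : Int) + 1 = ((i + 1 : Nat) : Int) := by push_cast; ring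
        have h1 : aLoop (c :: rest) (i : Int) gaps (-1) =
            aLoop rest (((i + 1 : Nat) : Int)) gaps (-1) := by
          simp only [aLoop, hc0, Bool.false_eq_true, if_false, if_neg (by decide : ¬ ((-1 : Int) ≠ -1))]
          rw [hcast]
        rw [h1, ih rest hcs' (i + 1) gaps n (by omega), keptRuns]
        simp [hc0]

theorem bLoop_fold (m : Nat) : ∀ (cs : List Char), cs.length ≤ m →
    ∀ (n : Nat) (i : Nat) (best : Option (Int × Int)),
    bLoop n cs i best = (keptRuns n cs i).foldl lexStep best := by
  induction m with
  | zero =>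
    intro cs hcs n i best
    cases cs with
    | nil => simp [bLoop, keptRuns]
    | cons a l => exact absurd hcs (by simp)
  | succ m ih =>
    intro cs hcs n i best
    cases cs with
    | nil => simp [bLoop, keptRuns]
    | cons c rest =>
      have hcs' : rest.length ≤ m := by simp [List.length_cons] at hcs; omega
      by_cases hc : PySem.Chars.isspace c = true
      · simp only [bLoop, keptRuns, hc, if_true]
        rw [List.foldl_append]
        rw [ih (rest.dropWhile PySem.Chars.isspace)
            (by have := List.length_dropWhile_le (p := PySem.Chars.isspace) (l := rest)
                omega)]
        congr 1
        by_cases hk : 1 < i + 1 + (rest.takeWhile PySem.Chars.isspace).length - i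
            ∨ i + 1 + (rest.takeWhile PySem.Chars.isspace).length = n
        · rw [if_pos hk, if_pos hk]
          cases best <;> rfl
        · rw [if_neg hk, if_neg hk]
          rfl
      · have hc0 : PySem.Chars.isspace c = false := by simpa using hc
        simp only [bLoop, keptRuns, hc0, Bool.false_eq_true, if_false]
        exact ih rest hcs' n (i + 1) best

theorem fold_lexStep_some (ks : List (Int × Int)) : ∀ (q : Int × Int),
    ∃ msome : Int × Int, ks.foldl lexStep (some q) = some msome ∧
      (msome ∈ ks ∨ msome = q) ∧ toLex q ≤ toLex msome ∧
      ∀ y ∈ ks, toLex y ≤ toLex msome := by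
  induction ks with
  | nil => exact fun q => ⟨q, rfl, Or.inr rfl, le_refl _, by simp⟩
  | cons p t ih =>
    intro q
    by_cases hlt : q.1 < p.1 ∨ (q.1 = p.1 ∧ q.2 < p.2)
    · obtain ⟨m, hm, hmem, hle, hub⟩ := ih p
      refine ⟨m, ?_, ?_, ?_, ?_⟩
      · simpa [List.foldl_cons, lexStep, hlt] using hm
      · rcases hmem with h | h
        · exact Or.inl (List.mem_cons_of_mem _ h)
        · exact Or.inl (h ▸ (by simp : p ∈ p :: t))
      · have hqp : toLex q ≤ toLex p := by
          rw [Prod.Lex.le_iff]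
          rcases hlt with h | ⟨h1, h2⟩
          · exact Or.inl h
          · exact Or.inr ⟨h1, le_of_lt h2⟩
        exact le_trans hqp hle
      · intro y hy
        rcases List.mem_cons.mp hy with h | h
        · exact h ▸ hle
        · exact hub y h
    · obtain ⟨m, hm, hmem, hle, hub⟩ := ih q
      refine ⟨m, ?_, ?_, hle, ?_⟩
      · simpa [List.foldl_cons, lexStep, hlt] using hm
      · rcases hmem with h | h
        · exact Or.inl (List.mem_cons_of_mem _ h)
        · exact Or.inr h
      · intro y hy
        rcases List.mem_cons.mp hy with h | h
        · have hpq : toLex p ≤ toLex q := by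
            rw [Prod.Lex.le_iff]
            rw [not_or, not_and, not_lt, not_lt] at hlt
            rcases lt_trichotomy p.1 q.1 with h1 | h1 | h1
            · exact Or.inl h1
            · have h2 : p.2 ≤ q.2 := by have := hlt.2 h1.symm; omega
              exact Or.inr ⟨h1, h2⟩
            · exact absurd h1 (not_lt.mpr hlt.1)
          exact h ▸ le_trans hpq hle
        · exact hub y h

theorem pairwise_le_getLast (l : List (Int × Int))
    (h : l.Pairwise (fun a b => toLex a ≤ toLex b)) (hne : l ≠ []) :
    ∀ y ∈ l, toLex y ≤ toLex (l.getLast hne) := by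
  induction l with
  | nil => exact absurd rfl hne
  | cons a t ih =>
    intro y hy
    cases t with
    | nil =>
      simp only [List.mem_singleton] at hy
      simp [hy]
    | cons b t' =>
      rw [List.getLast_cons (by simp)]
      rcases List.mem_cons.mp hy with hya | hyt
      · have : toLex a ≤ toLex (List.getLast (b :: t') (by simp)) := by
          have := (List.pairwise_cons.mp h).1
          exact this _ (List.getLast_mem (by simp))
        exact hya ▸ this
      · exact ih (List.pairwise_cons.mp h).2 (by simp) y hyt

theorem inferIndentation_eq_alt (line : String) :
    inferIndentation line = inferIndentation_alt line := by
  unfold inferIndentation inferIndentation_alt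
  have hA : flushA line.toList.length (aLoop line.toList 0 [] (-1))
      = keptRuns line.toList.length line.toList 0 := by
    have := aLoop_flush line.toList.length line.toList le_rfl 0 [] line.toList.length (by simp)
    simpa using this
  have hB : bLoop line.toList.length line.toList 0 none
      = (keptRuns line.toList.length line.toList 0).foldl lexStep none :=
    bLoop_fold line.toList.length line.toList le_rfl line.toList.length 0 none
  unfold flushA at hA
  simp only [hA, hB]
  cases hks : keptRuns line.toList.length line.toList 0 with
  | nil => simp
  | cons k t =>
    have hne : k :: t ≠ [] := by simp
    obtain ⟨mb, hmb, hmem, hqle, hub⟩ := fold_lexStep_some t k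
    have hfold : (k :: t).foldl lexStep none = some mb := by
      rw [List.foldl_cons]
      exact hmb
    rw [hfold, if_neg hne]
    have hgne : PySem.List.sorted (k :: t) (fun q => toLex q) ≠ [] := by
      rw [ne_eq, PySem.List.sorted_eq_nil_iff]
      simp
    rw [PySem.List.pyGetD_neg_one _ _ hgne]
    set pa := (PySem.List.sorted (k :: t) (fun q => toLex q)).getLast hgne with hpa
    have hpamem : pa ∈ k :: t :=
      (PySem.List.mem_sorted _ _ _ _).mp (List.getLast_mem hgne)
    have hubA : ∀ y ∈ k :: t, toLex y ≤ toLex pa := by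
      intro y hy
      exact pairwise_le_getLast _ (PySem.List.sorted_pairwise (k :: t) (fun q => toLex q)) hgne
        y ((PySem.List.mem_sorted _ _ _ _).mpr hy)
    have hmbmem : mb ∈ k :: t := by
      rcases hmem with h | h
      · exact List.mem_cons_of_mem _ h
      · simp [h]
    have hubB : ∀ y ∈ k :: t, toLex y ≤ toLex mb := by
      intro y hy
      rcases List.mem_cons.mp hy with h | h
      · exact h ▸ hqle
      · exact hub y h
    have hpamb : pa = mb := by
      have h1 : toLex pa ≤ toLex mb := hubB pa hpamem
      have h2 : toLex mb ≤ toLex pa := hubA mb hmbmem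
      exact toLex_inj.mp (le_antisymm h1 h2)
    rw [hpamb]

-- ===== VERDICT (by name: the statement is the Claim_ definition above) =====
theorem inferIndentation_spec : Claim_equal_inferIndentation := by
  intro line _
  unfold Spec_inferIndentation
  exact inferIndentation_eq_alt line
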